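-- pv_equiv track=rewrite | github.com/689photo/coding_test_python | 프로그래머스/2/131127. 할인 행사/할인 행사.py | solution
-- ===== SOURCE A (Python) =====
-- from collections import Counter
--
-- def solution(want, number, discount):
--     want_dict = dict(zip(want, number))
--
--     n = len(discount)
--     window_size = 10
--     result = 0
--
--     for i in range(n - window_size + 1):
--         current_window = discount[i:i + window_size]
--         current_count = Counter(current_window)
--
--         if all(current_count.get(item, 0) >= want_dict[item] for item in want_dict):
--             result += 1
--
--     return result
-- ===== SOURCE B (Python) =====
-- def solution(want, number, discount):
--     need = dict(zip(want, number))
--     n = len(discount)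
--     prefs = []
--     for k, v in need.items():
--         acc = [0]
--         c = 0
--         for item in discount:
--             c += (item == k)
--             acc.append(c)
--         prefs.append((acc, v))
--     result = 0
--     for i in range(n - 9):
--         if all(acc[i + 10] - acc[i] >= v for acc, v in prefs):
--             result += 1
--     return result
-- ===== Notes on version B (the rewrite author's own statement) =====
-- stated objective: alternative
-- what changed: Replaces A's per-window Counter construction and per-key lookups with one prefix-count array per wanted item built in a single pass, so each window check is a constant-time subtraction per wanted key.
import Mathlib
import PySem

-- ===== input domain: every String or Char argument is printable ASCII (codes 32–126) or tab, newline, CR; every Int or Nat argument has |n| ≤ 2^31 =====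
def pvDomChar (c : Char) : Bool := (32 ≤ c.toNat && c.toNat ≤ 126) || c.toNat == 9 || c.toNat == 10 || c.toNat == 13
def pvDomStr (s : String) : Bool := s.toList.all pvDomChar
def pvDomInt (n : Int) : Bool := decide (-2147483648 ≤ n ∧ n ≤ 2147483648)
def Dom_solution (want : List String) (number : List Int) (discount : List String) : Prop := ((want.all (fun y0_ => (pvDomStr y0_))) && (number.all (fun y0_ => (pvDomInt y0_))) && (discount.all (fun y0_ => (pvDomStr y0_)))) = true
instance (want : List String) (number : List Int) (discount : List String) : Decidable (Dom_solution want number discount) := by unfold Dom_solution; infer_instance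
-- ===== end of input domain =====

-- B replaces A's per-window Counter with one prefix-count array per wanted item, checked by
-- constant-time subtraction per window (objective: alternative, same exact result).

-- ===== PORT A =====
def solution (want : List String) (number : List Int) (discount : List String) : Int :=
  let want_dict : PySem.Dict String Int := PySem.Dict.ofList (want.zip number)
  let n : Int := (discount.length : Int)
  let window_size : Int := 10
  (PySem.List.pyRange 0 (n - window_size + 1) 1).foldl
    (fun result i =>
      let current_window := PySem.List.slice discount (some i) (some (i + window_size))
      let current_count := PySem.Dict.counter current_window
      -- 'for item in want_dict: current_count.get(item, 0) >= want_dict[item]':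
      -- dict keys are distinct, so want_dict[item] is exactly the item's pair value kv.2
      if want_dict.items.all (fun kv => current_count.getD kv.1 0 ≥ kv.2)
      then result + 1 else result)
    0

-- ===== PORT B =====
-- 'acc = [0]; c = 0; for item in discount: c += (item == k); acc.append(c)'
def pvPrefix (k : String) (discount : List String) : List Int :=
  (discount.foldl
    (fun (st : List Int × Int) item =>
      let c := st.2 + (if item == k then 1 else 0)
      (st.1 ++ [c], c))
    ([0], 0)).1

def solution_alt (want : List String) (number : List Int) (discount : List String) : Int :=
  let need : PySem.Dict String Int := PySem.Dict.ofList (want.zip number)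
  let n : Int := (discount.length : Int)
  let prefs : List (List Int × Int) := need.items.map (fun kv => (pvPrefix kv.1 discount, kv.2))
  (PySem.List.pyRange 0 (n - 9) 1).foldl
    (fun result i =>
      if prefs.all (fun av =>
            PySem.List.pyGetD av.1 (i + 10) 0 - PySem.List.pyGetD av.1 i 0 ≥ av.2)
      then result + 1 else result)
    0

-- ===== PRECONDITION & SPEC =====
def Spec_solution (want : List String) (number : List Int) (discount : List String) (out : Int) : Prop := out = solution_alt want number discount
instance (want : List String) (number : List Int) (discount : List String) (out : Int) : Decidable (Spec_solution want number discount out) := by unfold Spec_solution; infer_instance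

-- ===== CLAIM (what is proved, stated in full; the proofs are below) =====
def Claim_equal_solution : Prop := ∀ (want : List String) (number : List Int) (discount : List String), Dom_solution want number discount → Spec_solution want number discount (solution want number discount)

-- ===== LEMMAS AND PROOFS =====

-- invariant of B's inner scan
theorem pvPrefix_inv (k : String) (xs : List String) (acc0 : List Int) (c0 : Int) :
    xs.foldl
      (fun (st : List Int × Int) item =>
        let c := st.2 + (if item == k then 1 else 0)
        (st.1 ++ [c], c))
      (acc0, c0)
    = (acc0 ++ (List.range xs.length).map (fun m => c0 + ((xs.take (m+1)).count k : Int)),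
       c0 + (xs.count k : Int)) := by
  induction xs generalizing acc0 c0 with
  | nil => simp
  | cons x xs ih =>
    simp only [List.foldl_cons, ih, List.length_cons]
    rw [List.range_succ_eq_map]
    simp only [Prod.mk.injEq]
    refine ⟨?_, ?_⟩
    · simp [List.append_assoc, List.count_cons, Function.comp]
      intro a _
      ring
    · simp [List.count_cons]
      by_cases h : x = k <;> simp [h] <;> ring

theorem pvPrefix_eq (k : String) (xs : List String) :
    pvPrefix k xs = (List.range (xs.length + 1)).map (fun m => ((xs.take m).count k : Int)) := by
  unfold pvPrefix
  rw [pvPrefix_inv, List.range_succ_eq_map]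
  simp [Function.comp]

theorem pvPrefix_get (k : String) (xs : List String) (j : Nat) (hj : j ≤ xs.length) :
    PySem.List.pyGetD (pvPrefix k xs) (j : Int) 0 = ((xs.take j).count k : Int) := by
  rw [pvPrefix_eq, PySem.List.pyGetD_natCast]
  rw [List.getD_eq_getElem?_getD]
  rw [List.getElem?_map]
  rw [List.getElem?_range (by omega : j < xs.length + 1)]
  rfl

-- the window count as a difference of prefix counts
theorem pvWindowCount (k : String) (xs : List String) (i : Nat) (_h : i + 10 ≤ xs.length) :
    ((xs.drop i).take 10).count k = (xs.take (i + 10)).count k - (xs.take i).count k := by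
  rw [List.take_add, List.count_append]
  omega

theorem solution_spec' : ∀ (want : List String) (number : List Int) (discount : List String),
    solution want number discount = solution_alt want number discount := by
  intro want number discount
  unfold solution solution_alt
  simp only []
  have hrange : (discount.length : Int) - 10 + 1 = (discount.length : Int) - 9 := by ring
  rw [hrange]
  apply PySem.List.foldl_congr_mem
  intro acc i hi
  rw [PySem.List.mem_pyRange_one] at hi
  obtain ⟨hi0, hi1⟩ := hi
  have hb :
      ((PySem.Dict.ofList (want.zip number)).items.all fun kv =>
        decide ((PySem.Dict.counter (PySem.List.slice discount (some i) (some (i + 10)))).getD kv.1 0 ≥ kv.2))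
      = (((PySem.Dict.ofList (want.zip number)).items.map
            (fun kv => (pvPrefix kv.1 discount, kv.2))).all fun av =>
          decide (PySem.List.pyGetD av.1 (i + 10) 0 - PySem.List.pyGetD av.1 i 0 ≥ av.2)) := by
    rw [List.all_map]
    refine List.all_congr rfl ?_
    intro kv
    simp only [Function.comp]
    have hiN : i = ((i.toNat : Nat) : Int) := by omega
    have h10 : i + 10 = (((i.toNat + 10 : Nat)) : Int) := by omega
    have hle : i.toNat + 10 ≤ discount.length := by omega
    rw [PySem.Dict.getD_counter]
    rw [PySem.List.slice_toNat _ hi0 (by omega)]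
    have htn : (i + 10).toNat - i.toNat = 10 := by omega
    rw [htn]
    rw [hiN]
    have h10' : ((i.toNat : Int) + 10) = (((i.toNat + 10 : Nat)) : Int) := by push_cast; ring
    rw [h10', pvPrefix_get _ _ _ hle, pvPrefix_get _ _ _ (by omega)]
    simp only [Int.toNat_natCast]
    simp only [pvWindowCount kv.1 discount i.toNat hle]
    have hc : (discount.take i.toNat).count kv.1 ≤ (discount.take (i.toNat + 10)).count kv.1 := by
      rw [List.take_add, List.count_append]; omega
    simp only [decide_eq_decide]
    omega
  exact congrArg (fun b => if b then acc + 1 else acc) hb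

-- ===== VERDICT (by name: the statement is the Claim_ definition above) =====
theorem solution_spec : Claim_equal_solution := by
  intro want number discount _
  unfold Spec_solution
  exact solution_spec' want number discount
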